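-- pv_equiv track=rewrite | github.com/mashathepotato/visual-reasoning | utils/fot/maze_ops.py | segment_frames_from_path
-- ===== SOURCE A (Python) =====
-- from typing import List, Tuple
--
-- def path_to_segments(path: List[Tuple[int, int]]) -> List[List[Tuple[int, int]]]:
--     if not path:
--         return []
--     if len(path) == 1:
--         return [[path[0]]]
--
--     segments: List[List[Tuple[int, int]]] = []
--     curr = [path[0]]
--     curr_dir = (path[1][0] - path[0][0], path[1][1] - path[0][1])
--
--     for i in range(1, len(path)):
--         step = (path[i][0] - path[i - 1][0], path[i][1] - path[i - 1][1])
--         if step != curr_dir: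
--             segments.append(curr)
--             curr = [path[i - 1], path[i]]
--             curr_dir = step
--         else:
--             curr.append(path[i])
--     segments.append(curr)
--     return segments
--
-- def segment_frames_from_path(path: List[Tuple[int, int]]) -> List[List[Tuple[int, int]]]:
--     segments = path_to_segments(path)
--     frames: List[List[Tuple[int, int]]] = [[]]
--     current: List[Tuple[int, int]] = []
--     for seg in segments:
--         if current and seg and current[-1] == seg[0]:
--             current.extend(seg[1:])
--         else:
--             current.extend(seg)
--         frames.append(list(current))
--     return frames
-- ===== SOURCE B (Python) =====
-- def segment_frames_from_path(path):
--     # One pass over path: every frame is a direct prefix slice path[:i] at a corner.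
--     if not path:
--         return [[]]
--     if len(path) == 1:
--         return [[], [path[0]]]
--     frames = [[]]
--     d = (path[1][0] - path[0][0], path[1][1] - path[0][1])
--     for i in range(2, len(path)):
--         step = (path[i][0] - path[i - 1][0], path[i][1] - path[i - 1][1])
--         if step != d:
--             frames.append(list(path[:i]))
--             d = step
--     frames.append(list(path))
--     return frames
-- ===== Notes on version B (the rewrite author's own statement) =====
-- stated objective: simpler
-- what changed: B replaces A's two-phase pipeline (build an explicit list of straight segments, then merge them into a growing accumulator with an overlap check) by one pass over the path that appends a direct prefix slice path[:i] at each direction change.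
import Mathlib
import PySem

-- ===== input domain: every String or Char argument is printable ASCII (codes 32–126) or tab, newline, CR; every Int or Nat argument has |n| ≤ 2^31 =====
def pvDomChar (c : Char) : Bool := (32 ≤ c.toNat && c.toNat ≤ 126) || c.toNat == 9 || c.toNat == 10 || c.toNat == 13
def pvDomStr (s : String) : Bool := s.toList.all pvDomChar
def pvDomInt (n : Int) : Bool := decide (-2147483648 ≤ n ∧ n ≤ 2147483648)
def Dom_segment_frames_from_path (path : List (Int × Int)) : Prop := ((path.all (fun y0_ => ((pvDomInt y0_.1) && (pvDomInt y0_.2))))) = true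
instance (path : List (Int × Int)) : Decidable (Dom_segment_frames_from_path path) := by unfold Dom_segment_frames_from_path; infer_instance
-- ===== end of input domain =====

-- B replaces A's two phases (build a list of straight segments, then merge them into a
-- growing accumulator) by one pass that appends a prefix slice of path at each corner
-- (objective: simpler).

-- ===== PORT A =====
-- the for-loop of path_to_segments: state (segments, curr, curr_dir), prev = path[i-1], remaining = path[i:]
def pvSegLoop : List (Int × Int) → (Int × Int) → List (List (Int × Int)) → List (Int × Int) → (Int × Int) → List (List (Int × Int))
  | [], _, segments, curr, _ => segments ++ [curr]
  | q :: rest, prev, segments, curr, dir =>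
    let step : Int × Int := (q.1 - prev.1, q.2 - prev.2)
    if step ≠ dir then
      pvSegLoop rest q (segments ++ [curr]) [prev, q] step
    else
      pvSegLoop rest q segments (curr ++ [q]) dir

def path_to_segments (path : List (Int × Int)) : List (List (Int × Int)) :=
  match path with
  | [] => []
  | [p] => [[p]]
  | p0 :: p1 :: rest =>
    pvSegLoop (p1 :: rest) p0 [] [p0] (p1.1 - p0.1, p1.2 - p0.2)

-- the for-loop over segments: state (frames, current)
def pvFramesLoop : List (List (Int × Int)) → List (List (Int × Int)) → List (Int × Int) → List (List (Int × Int))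
  | [], frames, _ => frames
  | seg :: rest, frames, current =>
    let current' :=
      if current ≠ [] ∧ seg ≠ [] ∧ current.getLast? = seg.head? then
        current ++ seg.drop 1
      else
        current ++ seg
    pvFramesLoop rest (frames ++ [current']) current'

def segment_frames_from_path (path : List (Int × Int)) : List (List (Int × Int)) :=
  pvFramesLoop (path_to_segments path) [[]] []

-- ===== PORT B =====
-- Source B's single loop: at element q = path[i] (prev = path[i-1]), append path[:i] on a corner
def pvBLoop (path : List (Int × Int)) : List (Int × Int) → (Int × Int) → (Int × Int) → Nat → List (List (Int × Int)) → List (List (Int × Int))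
  | [], _, _, _, frames => frames ++ [path]
  | q :: rest, prev, d, i, frames =>
    let step : Int × Int := (q.1 - prev.1, q.2 - prev.2)
    if step ≠ d then
      pvBLoop path rest q step (i + 1) (frames ++ [path.take i])
    else
      pvBLoop path rest q d (i + 1) frames

def segment_frames_from_path_alt (path : List (Int × Int)) : List (List (Int × Int)) :=
  match path with
  | [] => [[]]
  | [p] => [[], [p]]
  | p0 :: p1 :: rest =>
    pvBLoop path rest p1 (p1.1 - p0.1, p1.2 - p0.2) 2 [[]]

-- ===== PRECONDITION & SPEC =====
def Spec_segment_frames_from_path (path : List (Int × Int)) (out : List (List (Int × Int))) : Prop := out = segment_frames_from_path_alt path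
instance (path : List (Int × Int)) (out : List (List (Int × Int))) : Decidable (Spec_segment_frames_from_path path out) := by unfold Spec_segment_frames_from_path; infer_instance

-- ===== CLAIM (what is proved, stated in full; the proofs are below) =====
def Claim_equal_segment_frames_from_path : Prop := ∀ (path : List (Int × Int)), Dom_segment_frames_from_path path → Spec_segment_frames_from_path path (segment_frames_from_path path)

-- ===== LEMMAS AND PROOFS =====

-- segments only accumulate at the back
theorem pvSegLoop_acc (rest : List (Int × Int)) (prev : Int × Int)
    (segments : List (List (Int × Int))) (curr : List (Int × Int)) (dir : Int × Int) :
    pvSegLoop rest prev segments curr dir = segments ++ pvSegLoop rest prev [] curr dir := by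
  induction rest generalizing prev segments curr dir with
  | nil => simp [pvSegLoop]
  | cons q rest ih =>
    simp only [pvSegLoop]
    split
    · rw [ih q (segments ++ [curr]), ih q ([] ++ [curr])]; simp
    · exact ih q segments _ _

-- the main fused induction: A's framesLoop over the remaining segments equals B's loop
theorem pvMain (rest : List (Int × Int)) (prev : Int × Int) (curr current : List (Int × Int))
    (dir : Int × Int) (frames : List (List (Int × Int)))
    (hcurr : curr ≠ []) (hlast : curr.getLast? = some prev)
    (hmerge : current = [] ∨ current.getLast? = curr.head?) :
    pvFramesLoop (pvSegLoop rest prev [] curr dir) frames current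
      = pvBLoop (current ++ (if current = [] then curr else curr.tail) ++ rest) rest prev dir
          (current.length + (if current = [] then curr else curr.tail).length) frames := by
  induction rest generalizing prev curr current dir frames with
  | nil =>
    simp only [pvSegLoop, pvBLoop, List.nil_append, pvFramesLoop]
    congr 1
    by_cases hc : current = []
    · subst hc; simp [hcurr]
    · have hcond : current ≠ [] ∧ curr ≠ [] ∧ current.getLast? = curr.head? :=
        ⟨hc, hcurr, hmerge.resolve_left hc⟩
      simp only [if_pos hcond, if_neg hc]
      cases curr with
      | nil => exact absurd rfl hcurr
      | cons a t => simp
  | cons q rest ih =>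
    simp only [pvSegLoop, pvBLoop]
    set m : List (Int × Int) := if current = [] then curr else curr.tail with hm
    split
    · -- corner: step ≠ dir
      rename_i hne
      rw [pvSegLoop_acc]
      have hmrg : (if current ≠ [] ∧ curr ≠ [] ∧ current.getLast? = curr.head? then
          current ++ curr.drop 1 else current ++ curr) = current ++ m := by
        by_cases hc : current = []
        · subst hc; simp [hm]
        · simp [hm, hc, hcurr, hmerge.resolve_left hc, List.drop_one]
      have hstep : pvFramesLoop ([curr] ++ pvSegLoop rest q [] [prev, q] (q.1 - prev.1, q.2 - prev.2)) frames current
          = pvFramesLoop (pvSegLoop rest q [] [prev, q] (q.1 - prev.1, q.2 - prev.2))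
              (frames ++ [current ++ m]) (current ++ m) := by
        simp only [List.cons_append, List.nil_append, pvFramesLoop, hmrg]
      simp only [List.nil_append]
      rw [hstep]
      -- last of current ++ m is prev
      have hcm_last : (current ++ m).getLast? = some prev := by
        by_cases hmn : m = []
        · -- m = curr.tail = [], so curr = [x], x = prev, current ≠ []
          by_cases hc : current = []
          · exfalso; rw [hm, if_pos hc] at hmn; exact hcurr hmn
          · have ht : curr.tail = [] := by rw [hm, if_neg hc] at hmn; exact hmn
            cases curr with
            | nil => exact absurd rfl hcurr
            | cons a t =>
              have : t = [] := ht
              subst this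
              have : a = prev := by simpa using hlast
              subst this
              simpa [hmn] using hmerge.resolve_left hc
        · rw [List.getLast?_append_of_ne_nil current hmn]
          by_cases hc : current = []
          · rwa [hm, if_pos hc]
          · rw [hm, if_neg hc]
            rw [hm, if_neg hc] at hmn
            cases curr with
            | nil => exact absurd rfl hcurr
            | cons a t =>
              have ht : t ≠ [] := hmn
              have h2 : (a :: t).getLast? = t.getLast? := List.getLast?_append_of_ne_nil [a] ht
              rw [List.tail_cons, ← h2]; exact hlast
      have := ih q [prev, q] (current ++ m) (q.1 - prev.1, q.2 - prev.2)
          (frames ++ [current ++ m]) (by simp) (by simp)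
          (Or.inr (by simp [hcm_last]))
      have hcm : current ++ m ≠ [] := by
        intro h
        have hc : current = [] := by cases current <;> simp_all
        subst hc
        simp only [List.nil_append] at h
        rw [hm, if_pos rfl] at h
        exact hcurr h
      simp only [if_neg hcm, List.tail_cons] at this
      rw [this]
      have h1 : current ++ m ++ [q] ++ rest = current ++ m ++ q :: rest := by simp
      have h2 : (current ++ m).length + [q].length = current.length + m.length + 1 := by simp
      have h3 : (current ++ m ++ q :: rest).take (current.length + m.length) = current ++ m := by
        rw [show current.length + m.length = (current ++ m).length by simp, List.take_left]
      rw [h1, h2, h3]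
    · -- straight: step = dir
      rename_i heq
      have hq : curr ++ [q] ≠ [] := by simp
      have hql : (curr ++ [q]).getLast? = some q := by simp
      have := ih q (curr ++ [q]) current dir frames hq hql
          (by
            rcases hmerge with hc | hl
            · exact Or.inl hc
            · refine Or.inr ?_
              cases curr with
              | nil => exact absurd rfl hcurr
              | cons a t => simpa using hl)
      rw [this]
      have hm' : (if current = [] then curr ++ [q] else (curr ++ [q]).tail) = m ++ [q] := by
        by_cases hc : current = []
        · simp [hm, hc]
        · cases curr with
          | nil => exact absurd rfl hcurr
          | cons a t => simp [hm, hc]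
      rw [hm']
      have h1 : current ++ (m ++ [q]) ++ rest = current ++ m ++ q :: rest := by simp
      have h2 : current.length + (m ++ [q]).length = current.length + m.length + 1 := by simp; omega
      rw [h1, h2]

theorem segment_frames_eq (path : List (Int × Int)) :
    segment_frames_from_path path = segment_frames_from_path_alt path := by
  match path with
  | [] => rfl
  | [p] => simp [segment_frames_from_path, segment_frames_from_path_alt, path_to_segments, pvFramesLoop]
  | p0 :: p1 :: rest =>
    simp only [segment_frames_from_path, segment_frames_from_path_alt, path_to_segments]
    -- first iteration of A's segment loop: step = curr_dir, so the else branch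
    have h1 : pvSegLoop (p1 :: rest) p0 [] [p0] (p1.1 - p0.1, p1.2 - p0.2)
        = pvSegLoop rest p1 [] [p0, p1] (p1.1 - p0.1, p1.2 - p0.2) := by
      simp [pvSegLoop]
    rw [h1]
    have := pvMain rest p1 [p0, p1] [] (p1.1 - p0.1, p1.2 - p0.2) [[]]
        (by simp) (by simp) (Or.inl rfl)
    simpa using this

-- ===== VERDICT (by name: the statement is the Claim_ definition above) =====
theorem segment_frames_from_path_spec : Claim_equal_segment_frames_from_path := by
  intro path _
  unfold Spec_segment_frames_from_path
  exact segment_frames_eq path
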